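-- pv_equiv track=rewrite | github.com/thedatadudech/apertus-transparency-guide | app.py | simulate_bert_tokenization
-- ===== SOURCE A (Python) =====
-- def simulate_bert_tokenization(word):
--     """Simulate BERT WordPiece tokenization"""
--     # BERT uses ## for subwords
--     tokens = []
--     remaining = word.lower()
--
--     # BERT tends to keep root words whole when possible
--     if len(remaining) <= 6:
--         return [remaining]
--
--     # Split into meaningful chunks
--     while remaining:
--         if len(remaining) <= 4:
--             tokens.append("##" + remaining if tokens else remaining)
--             break
--         elif len(remaining) <= 8:
--             if not tokens:  # First token
--                 tokens.append(remaining[:4])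
--                 remaining = remaining[4:]
--             else:
--                 tokens.append("##" + remaining)
--                 break
--         else:
--             chunk_size = 4 if not tokens else 5
--             token = remaining[:chunk_size]
--             tokens.append("##" + token if tokens else token)
--             remaining = remaining[chunk_size:]
--
--     return tokens
-- ===== SOURCE B (Python) =====
-- def simulate_bert_tokenization(word):
--     """Simulate BERT WordPiece tokenization (closed-form chunk count)."""
--     w = word.lower()
--     if len(w) <= 6:
--         return [w]
--     m = len(w) - 4
--     k = 0 if m <= 8 else (m - 4) // 5
--     return [w[:4]] + ["##" + w[4 + 5 * i: 9 + 5 * i] for i in range(k)] + ["##" + w[4 + 5 * k:]]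
-- ===== Notes on version B (the rewrite author's own statement) =====
-- stated objective: faster
-- what changed: Replaces A's step-by-step length-testing while loop, which re-copies the remaining suffix on every iteration, by a closed-form count of the interior 5-char chunks plus direct slicing: first token w[:4], then ceil((len(w)-12)/5) interior prefixed 5-char slices from a range comprehension, then the prefixed remainder.
import Mathlib
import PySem

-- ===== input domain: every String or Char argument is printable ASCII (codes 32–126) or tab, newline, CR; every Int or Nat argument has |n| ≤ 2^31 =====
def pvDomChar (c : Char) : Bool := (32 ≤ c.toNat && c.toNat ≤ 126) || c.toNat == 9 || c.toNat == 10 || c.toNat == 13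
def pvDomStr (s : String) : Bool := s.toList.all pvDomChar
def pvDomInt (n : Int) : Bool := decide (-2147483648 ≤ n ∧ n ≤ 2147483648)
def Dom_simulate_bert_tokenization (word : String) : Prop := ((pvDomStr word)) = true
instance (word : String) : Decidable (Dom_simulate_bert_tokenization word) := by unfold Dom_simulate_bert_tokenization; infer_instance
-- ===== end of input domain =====

-- B replaces A's step-by-step length-testing while loop (which re-slices the remaining suffix each
-- iteration) by a closed-form arithmetic count of the interior 5-char chunks plus direct slicing (objective: faster, measured).

-- ===== PORT A =====
-- the while loop of A; tokens as char lists, turned into Strings at the end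
def pvLoopA (tokens : List (List Char)) (r : List Char) : List (List Char) :=
  if r = [] then tokens
  else if r.length ≤ 4 then
    tokens ++ [if tokens = [] then r else '#' :: '#' :: r]
  else if r.length ≤ 8 then
    if tokens = [] then pvLoopA (tokens ++ [r.take 4]) (r.drop 4)
    else tokens ++ ['#' :: '#' :: r]
  else
    let chunk_size := if tokens = [] then 4 else 5
    let token := r.take chunk_size
    pvLoopA (tokens ++ [if tokens = [] then token else '#' :: '#' :: token]) (r.drop chunk_size)
termination_by r.length
decreasing_by
  · simp [List.length_drop]; omega
  · simp only [List.length_drop]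
    have : 8 < r.length := by omega
    split <;> omega

def simulate_bert_tokenization (word : String) : List String :=
  let remaining := PySem.Chars.lower word.toList
  if remaining.length ≤ 6 then [String.ofList remaining]
  else (pvLoopA [] remaining).map String.ofList

-- ===== PORT B =====
def simulate_bert_tokenization_alt (word : String) : List String :=
  let w := PySem.Chars.lower word.toList
  if w.length ≤ 6 then [String.ofList w]
  else
    let m := w.length - 4
    let k : Nat := if m ≤ 8 then 0 else (m - 4) / 5
    [String.ofList (w.take 4)]
      ++ (PySem.List.pyRange 0 (k : Int) 1).map
          (fun i => String.ofList ('#' :: '#' ::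
            PySem.List.slice w (some (4 + 5 * i)) (some (9 + 5 * i))))
      ++ [String.ofList ('#' :: '#' :: w.drop (4 + 5 * k))]

-- ===== PRECONDITION & SPEC =====
def Spec_simulate_bert_tokenization (word : String) (out : List String) : Prop := out = simulate_bert_tokenization_alt word
instance (word : String) (out : List String) : Decidable (Spec_simulate_bert_tokenization word out) := by unfold Spec_simulate_bert_tokenization; infer_instance

-- ===== CLAIM (what is proved, stated in full; the proofs are below) =====
def Claim_equal_simulate_bert_tokenization : Prop := ∀ (word : String), Dom_simulate_bert_tokenization word → Spec_simulate_bert_tokenization word (simulate_bert_tokenization word)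

-- ===== LEMMAS AND PROOFS =====

-- A's tail loop (tokens nonempty): take 5-char chunks while more than 8 chars remain
def pvChunks (r : List Char) : List (List Char) :=
  if r.length ≤ 8 then ['#' :: '#' :: r]
  else ('#' :: '#' :: r.take 5) :: pvChunks (r.drop 5)
termination_by r.length
decreasing_by simp [List.length_drop]; omega

theorem pvLoopA_nonempty (r : List Char) (hr : r ≠ []) (t : List Char) (ts : List (List Char)) :
    pvLoopA (t :: ts) r = (t :: ts) ++ pvChunks r := by
  induction r using pvChunks.induct generalizing t ts with
  | case1 r h =>
    rw [pvChunks, if_pos h, pvLoopA]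
    simp only [if_neg hr]
    by_cases h4 : r.length ≤ 4 <;> simp [h4, h]
  | case2 r h ih =>
    rw [pvChunks, if_neg h, pvLoopA]
    have hne : r ≠ [] := by intro e; simp [e] at h
    have h4 : ¬ r.length ≤ 4 := by omega
    simp only [if_neg hne, if_neg h4, if_neg h]
    have hcons : (t :: ts : List (List Char)) ≠ [] := by simp
    simp only [hcons, reduceIte]
    have hd5 : r.drop 5 ≠ [] := by
      intro e; have := congrArg List.length e; simp at this; omega
    have := ih hd5 t (ts ++ ['#' :: '#' :: r.take 5])
    simp only [List.cons_append, List.append_assoc] at this ⊢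
    rw [this]
    simp

theorem pvChunks_closed (k : Nat) (r : List Char)
    (hk : k = (if r.length ≤ 8 then 0 else (r.length - 4) / 5)) (hr : r ≠ []) :
    pvChunks r = (List.range k).map (fun i => '#' :: '#' :: ((r.drop (5 * i)).take 5))
      ++ ['#' :: '#' :: r.drop (5 * k)] := by
  induction k generalizing r with
  | zero =>
    have h8 : r.length ≤ 8 := by
      by_contra h
      rw [if_neg h] at hk
      omega
    rw [pvChunks, if_pos h8]; simp
  | succ j ih =>
    have h8 : ¬ r.length ≤ 8 := by
      intro h; rw [if_pos h] at hk; omega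
    rw [pvChunks, if_neg h8]
    rw [if_neg h8] at hk
    have hj : j = (if (r.drop 5).length ≤ 8 then 0 else ((r.drop 5).length - 4) / 5) := by
      rw [List.length_drop]
      split <;> omega
    have hd5 : r.drop 5 ≠ [] := by
      intro e; have := congrArg List.length e; simp at this; omega
    rw [ih (r.drop 5) hj hd5, List.range_succ_eq_map, List.map_cons, List.map_map]
    simp only [List.drop_drop, List.drop_zero, Nat.mul_zero, List.cons_append,
      Nat.mul_succ]
    simp [Nat.add_comm]
    intro a _
    have h : 5 + 5 * a = 5 * (a + 1) := by omega
    rw [h]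

-- ===== VERDICT (by name: the statement is the Claim_ definition above) =====
theorem simulate_bert_tokenization_spec : Claim_equal_simulate_bert_tokenization := by
  intro word _
  unfold Spec_simulate_bert_tokenization simulate_bert_tokenization simulate_bert_tokenization_alt
  set w := PySem.Chars.lower word.toList with hw
  by_cases h6 : w.length ≤ 6
  · simp [h6]
  · simp only [h6]
    set k : Nat := if w.length - 4 ≤ 8 then 0 else (w.length - 4 - 4) / 5 with hkdef
    have hne : w ≠ [] := by
      intro e; have := congrArg List.length e; simp only [List.length_nil] at this; omega
    -- first unfolding of A's loop: always peels w.take 4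
    have hstep : pvLoopA [] w = pvLoopA [w.take 4] (w.drop 4) := by
      rw [pvLoopA]
      simp only [if_neg hne]
      have h4 : ¬ w.length ≤ 4 := by omega
      simp only [if_neg h4]
      by_cases h8 : w.length ≤ 8 <;> simp [h8]
    have hdne : w.drop 4 ≠ [] := by
      intro e; have := congrArg List.length e
      simp only [List.length_drop, List.length_nil] at this; omega
    have hklen : k = if (w.drop 4).length ≤ 8 then 0 else ((w.drop 4).length - 4) / 5 := by
      rw [List.length_drop]
    rw [hstep, pvLoopA_nonempty _ hdne, pvChunks_closed k (w.drop 4) hklen hdne]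
    rw [PySem.List.pyRange_one]
    simp only [Int.sub_zero, Int.toNat_natCast, List.map_map, List.map_append,
      List.map_cons, List.map_nil, List.cons_append, List.nil_append]
    have hdd : List.drop (5 * k) (List.drop 4 w) = List.drop (4 + 5 * k) w := by
      rw [List.drop_drop]
    rw [hdd]
    refine congrArg₂ List.cons rfl ?_
    refine congrArg (· ++ [String.ofList ('#' :: '#' :: List.drop (4 + 5 * k) w)]) ?_
    apply List.map_congr_left
    intro j _
    simp only [Function.comp_apply, Int.zero_add]
    have h4 : (4 + 5 * (j : Int)) = ((4 + 5 * j : Nat) : Int) := by push_cast; ring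
    have h9 : (9 + 5 * (j : Int)) = ((9 + 5 * j : Nat) : Int) := by push_cast; ring
    rw [h4, h9, PySem.List.slice_natCast, List.drop_drop]
    have e1 : (9 + 5 * j) - (4 + 5 * j) = 5 := by omega
    rw [e1]
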